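-- pv_equiv track=rewrite | github.com/peguesj/lfg | lib/devdrive_v2/apfs_volume.py | _parse_snapshot_output
-- ===== SOURCE A (Python) =====
-- def _parse_snapshot_output(output: str) -> list[dict[str, str]]:
--     """Parse the text output of ``diskutil apfs listSnapshots``.
--
--     diskutil snapshot lines look like::
--
--         +-- Snapshot: com.apple.TimeMachine.2024-01-15-120000
--         |   XID: 12345
--         |   Created: 2024-01-15 12:00:00 +0000
--
--     This parser captures ``Snapshot:`` and ``Created:`` values, emitting one
--     dict per snapshot.  Unknown output formats are handled gracefully.
--
--     Args:
--         output: Raw stdout from diskutil.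
--
--     Returns:
--         List of dicts with ``name`` and ``date`` keys.
--     """
--     snapshots: list[dict[str, str]] = []
--     current: dict[str, str] = {}
--     for line in output.splitlines():
--         stripped = line.strip()
--         # Snapshot name line
--         if "Snapshot:" in stripped:
--             if current:
--                 snapshots.append(current)
--             current = {"name": stripped.split("Snapshot:")[-1].strip(), "date": ""}
--         # Created / date line
--         elif "Created:" in stripped and current:
--             current["date"] = stripped.split("Created:")[-1].strip()
--     if current:
--         snapshots.append(current)
--     return snapshots
-- ===== SOURCE B (Python) =====
-- def _parse_snapshot_output(output: str) -> list[dict[str, str]]: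
--     """Two-phase reimplementation: first group stripped lines into blocks
--     (one block per line containing "Snapshot:", discarding anything before
--     the first such line), then reduce each block to its dict, taking the
--     LAST "Created:" line of the block as the date."""
--     lines = [line.strip() for line in output.splitlines()]
--     n = len(lines)
--     # Phase 1: partition into blocks, each starting at a "Snapshot:" line.
--     blocks = []
--     i = 0
--     while i < n:
--         if "Snapshot:" in lines[i]:
--             j = i + 1
--             while j < n and "Snapshot:" not in lines[j]:
--                 j += 1
--             blocks.append(lines[i:j])
--             i = j
--         else:
--             i += 1
--     # Phase 2: reduce each block to {name, date}.
--     result = []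
--     for block in blocks:
--         name = block[0].split("Snapshot:")[-1].strip()
--         date = ""
--         for line in reversed(block[1:]):
--             if "Created:" in line:
--                 date = line.split("Created:")[-1].strip()
--                 break
--         result.append({"name": name, "date": date})
--     return result
-- ===== Notes on version B (the rewrite author's own statement) =====
-- stated objective: alternative
-- what changed: Replaced A's single-pass flush-on-new-snapshot state machine by a two-phase group-then-reduce: first partition the stripped lines into blocks starting at each 'Snapshot:' line (discarding lines before the first), then map each block to its dict, taking the last 'Created:' line of the block (found by a reversed scan with break) as the date.
import Mathlib
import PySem

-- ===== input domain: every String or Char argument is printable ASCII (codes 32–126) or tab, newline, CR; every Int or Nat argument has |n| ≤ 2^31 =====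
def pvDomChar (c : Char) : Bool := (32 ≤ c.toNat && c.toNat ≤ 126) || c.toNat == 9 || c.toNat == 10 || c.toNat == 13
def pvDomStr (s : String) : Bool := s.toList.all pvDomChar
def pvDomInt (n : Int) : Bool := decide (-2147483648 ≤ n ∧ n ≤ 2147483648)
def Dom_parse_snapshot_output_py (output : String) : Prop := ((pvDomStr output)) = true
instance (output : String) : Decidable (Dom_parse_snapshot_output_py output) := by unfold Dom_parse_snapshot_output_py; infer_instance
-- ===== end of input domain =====

-- B replaces A's single-pass flush-on-new-snapshot state machine by a two-phase
-- group-into-blocks-then-reduce decomposition (objective: alternative, same cost).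

-- ===== PORT A =====
-- shared line-level primitives, identical expressions in both Python sources:
-- '"sep" in line' and 'line.split(sep)[-1].strip()' (split? is some: sep is a
-- nonempty literal; the split list is never empty, so [-1] is its last element)
def pvIsSnap (l : String) : Bool := PySem.Str.isIn "Snapshot:" l
def pvIsCreated (l : String) : Bool := PySem.Str.isIn "Created:" l
def pvAfter (l sep : String) : String :=
  PySem.Str.strip (((PySem.Str.split? l sep).getD []).getLastD "")

-- one iteration of A's loop: state = (snapshots, current); current = {} ↔ items = []
def pvAStep (st : List (List (String × String)) × PySem.Dict String String)
    (line : String) : List (List (String × String)) × PySem.Dict String String :=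
  let stripped := PySem.Str.strip line
  if pvIsSnap stripped then
    let snaps := if st.2.items ≠ [] then st.1 ++ [st.2.items] else st.1
    (snaps, PySem.Dict.mk [("name", pvAfter stripped "Snapshot:"), ("date", "")])
  else if pvIsCreated stripped = true ∧ st.2.items ≠ [] then
    (st.1, st.2.insert "date" (pvAfter stripped "Created:"))
  else st

def parse_snapshot_output_py (output : String) : List (List (String × String)) :=
  let st := (PySem.Str.splitlines output).foldl pvAStep ([], PySem.Dict.mk [])
  if st.2.items ≠ [] then st.1 ++ [st.2.items] else st.1

-- ===== PORT B =====
-- phase 1 of Source B: the outer while-loop over i; the inner while-loop advancing j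
-- to the next "Snapshot:" line is the takeWhile/dropWhile split, and
-- lines[i:j] = lines[i] :: takeWhile (no header) rest
def pvToBlocks : List String → List (List String)
  | [] => []
  | l :: ls =>
    if pvIsSnap l then
      (l :: ls.takeWhile (fun x => !pvIsSnap x)) ::
        pvToBlocks (ls.dropWhile (fun x => !pvIsSnap x))
    else pvToBlocks ls
termination_by ls => ls.length
decreasing_by
  · exact Nat.lt_succ_of_le (List.length_dropWhile_le _ _)
  · exact Nat.lt_succ_of_le (Nat.le_refl _)

-- phase 2 of Source B: block → {"name": …, "date": …}; the reversed search with
-- break is find? on the reversed tail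
def pvReduce (block : List String) : List (String × String) :=
  let name := pvAfter (block.headD "") "Snapshot:"
  let date := match block.tail.reverse.find? (fun l => pvIsCreated l) with
    | some l => pvAfter l "Created:"
    | none => ""
  [("name", name), ("date", date)]

def parse_snapshot_output_py_alt (output : String) : List (List (String × String)) :=
  let lines := (PySem.Str.splitlines output).map PySem.Str.strip
  (pvToBlocks lines).map pvReduce

-- ===== PRECONDITION & SPEC =====
def Spec_parse_snapshot_output_py (output : String) (out : List (List (String × String))) : Prop := out = parse_snapshot_output_py_alt output
instance (output : String) (out : List (List (String × String))) : Decidable (Spec_parse_snapshot_output_py output out) := by unfold Spec_parse_snapshot_output_py; infer_instance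

-- ===== CLAIM (what is proved, stated in full; the proofs are below) =====
def Claim_equal_parse_snapshot_output_py : Prop := ∀ (output : String), Dom_parse_snapshot_output_py output → Spec_parse_snapshot_output_py output (parse_snapshot_output_py output)

-- ===== LEMMAS AND PROOFS =====

-- A's step on an already-stripped line (strip is applied once, by foldl_map)
def pvBStep (st : List (List (String × String)) × PySem.Dict String String)
    (stripped : String) : List (List (String × String)) × PySem.Dict String String :=
  if pvIsSnap stripped then
    let snaps := if st.2.items ≠ [] then st.1 ++ [st.2.items] else st.1
    (snaps, PySem.Dict.mk [("name", pvAfter stripped "Snapshot:"), ("date", "")])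
  else if pvIsCreated stripped = true ∧ st.2.items ≠ [] then
    (st.1, st.2.insert "date" (pvAfter stripped "Created:"))
  else st

def pvFinish (st : List (List (String × String)) × PySem.Dict String String) :
    List (List (String × String)) :=
  if st.2.items ≠ [] then st.1 ++ [st.2.items] else st.1

def pvRevDate (body : List String) (d : String) : String :=
  match body.reverse.find? (fun l => pvIsCreated l) with
  | some l => pvAfter l "Created:"
  | none => d

theorem pvRevDate_cons (l : String) (body : List String) (d : String) :
    pvRevDate (l :: body) d = pvRevDate body (if pvIsCreated l then pvAfter l "Created:" else d) := by
  unfold pvRevDate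
  rw [List.reverse_cons, List.find?_append]
  cases h : body.reverse.find? (fun l => pvIsCreated l) with
  | some x => simp
  | none =>
    cases hc : pvIsCreated l <;> simp [hc]

theorem pvLem2 (g : List String) (acc : List (List (String × String))) (n d : String) :
    pvFinish (g.foldl pvBStep (acc, PySem.Dict.mk [("name", n), ("date", d)])) =
      acc ++ [("name", n), ("date", pvRevDate (g.takeWhile (fun x => !pvIsSnap x)) d)] ::
        (pvToBlocks (g.dropWhile (fun x => !pvIsSnap x))).map pvReduce := by
  induction g generalizing acc n d with
  | nil => simp [pvFinish, pvToBlocks, pvRevDate]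
  | cons l t ih =>
    by_cases hs : pvIsSnap l = true
    · have hstep : pvBStep (acc, PySem.Dict.mk [("name", n), ("date", d)]) l =
          (acc ++ [[("name", n), ("date", d)]],
           PySem.Dict.mk [("name", pvAfter l "Snapshot:"), ("date", "")]) := by
        simp [pvBStep, hs]
      rw [List.foldl_cons, hstep, ih]
      simp [hs, pvToBlocks, pvReduce, pvRevDate]
    · by_cases hc : pvIsCreated l = true
      · have hstep : pvBStep (acc, PySem.Dict.mk [("name", n), ("date", d)]) l =
            (acc, PySem.Dict.mk [("name", n), ("date", pvAfter l "Created:")]) := by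
          simp [pvBStep, hs, hc, PySem.Dict.insert, PySem.Dict.contains]
        rw [List.foldl_cons, hstep, ih]
        simp [hs, pvRevDate_cons, hc]
      · have hstep : pvBStep (acc, PySem.Dict.mk [("name", n), ("date", d)]) l =
            (acc, PySem.Dict.mk [("name", n), ("date", d)]) := by
          simp [pvBStep, hs, hc]
        rw [List.foldl_cons, hstep, ih]
        simp [hs, pvRevDate_cons, hc]

theorem pvLem1 (g : List String) (acc : List (List (String × String))) :
    pvFinish (g.foldl pvBStep (acc, PySem.Dict.mk [])) =
      acc ++ (pvToBlocks g).map pvReduce := by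
  induction g generalizing acc with
  | nil => simp [pvFinish, pvToBlocks]
  | cons l t ih =>
    by_cases hs : pvIsSnap l = true
    · have hstep : pvBStep (acc, PySem.Dict.mk []) l =
          (acc, PySem.Dict.mk [("name", pvAfter l "Snapshot:"), ("date", "")]) := by
        simp [pvBStep, hs]
      rw [List.foldl_cons, hstep, pvLem2]
      simp [hs, pvToBlocks, pvReduce, pvRevDate]
    · have hstep : pvBStep (acc, PySem.Dict.mk []) l = (acc, PySem.Dict.mk []) := by
        simp [pvBStep, hs]
      rw [List.foldl_cons, hstep, ih]
      simp [pvToBlocks, hs]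

-- ===== VERDICT (by name: the statement is the Claim_ definition above) =====
theorem parse_snapshot_output_py_spec : Claim_equal_parse_snapshot_output_py := by
  intro output _
  unfold Spec_parse_snapshot_output_py parse_snapshot_output_py parse_snapshot_output_py_alt
  have h : (PySem.Str.splitlines output).foldl pvAStep ([], PySem.Dict.mk []) =
      ((PySem.Str.splitlines output).map PySem.Str.strip).foldl pvBStep ([], PySem.Dict.mk []) := by
    rw [List.foldl_map]
    rfl
  simp only [h]
  exact pvLem1 _ []
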